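-- pv_equiv track=rewrite | github.com/sungsteven/Tao-Python-Repo | PythonApplication1/pydnp3_master_update/DNP3_SC/dnp3_frame.py | getDataBlockLength
-- ===== SOURCE A (Python) =====
-- def getDataBlockLength(received_data):
--     lenVal = received_data[2]
--     loopCount = 0
--     dlnCount = 5    # octets not counted in Datalink header (05, 64, LEN, & CRC)
--     dbnCount = 2    # octets not counted in Data Block (CRC's 2 for each DB)
--     dlCount = 5     # the # of countable bytes in Datalink header
--     dbCount = 16    # the max # of countable bytes in a Data Block
--     minCount = 0x05 # min LEN includes 1 Datalink header & partial data block
--     if lenVal > minCount: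
--         lenTemp = lenVal - dlCount
--         while True:
--             lenTemp -= dbCount
--             loopCount += 1
--             if lenTemp < dbCount:
--                 break
--         if lenTemp > 0:
--             loopCount += 1
--         return (loopCount, lenVal+dlnCount+loopCount*dbnCount)
--     elif lenVal == minCount:
--         return (0, lenVal+dlnCount)
--     else:
--         return (-1, -1)
-- ===== SOURCE B (Python) =====
-- def getDataBlockLength(received_data):
--     lenVal = received_data[2]
--     if lenVal > 5:
--         loopCount = (lenVal + 10) // 16   # = ceil((lenVal - 5) / 16)
--         return (loopCount, lenVal + 5 + loopCount * 2)
--     elif lenVal == 5: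
--         return (0, lenVal + 5)
--     else:
--         return (-1, -1)
-- ===== Notes on version B (the rewrite author's own statement) =====
-- stated objective: simpler
-- what changed: Replaces the subtract-16 while-loop plus post-loop increment with the closed-form ceiling division loopCount = (lenVal + 10) // 16.
-- outside the precondition, e.g. on getDataBlockLength([2]): A raises IndexError, B raises IndexError
import Mathlib
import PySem

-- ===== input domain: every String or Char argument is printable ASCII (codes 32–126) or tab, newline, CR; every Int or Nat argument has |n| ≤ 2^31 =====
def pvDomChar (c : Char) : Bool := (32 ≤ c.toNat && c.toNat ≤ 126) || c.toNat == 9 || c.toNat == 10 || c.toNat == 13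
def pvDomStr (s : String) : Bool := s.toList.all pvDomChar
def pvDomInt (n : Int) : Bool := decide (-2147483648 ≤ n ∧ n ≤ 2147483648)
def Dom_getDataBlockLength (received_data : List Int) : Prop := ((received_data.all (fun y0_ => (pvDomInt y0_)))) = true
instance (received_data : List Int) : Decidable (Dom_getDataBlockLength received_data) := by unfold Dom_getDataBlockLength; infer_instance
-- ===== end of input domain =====

-- B replaces A's subtract-16 while-loop (plus post-loop increment) by the closed-form
-- ceiling division loopCount = (lenVal + 10) // 16; objective: simpler.

-- ===== PORT A =====
-- A's 'while True: lenTemp -= 16; loopCount += 1; if lenTemp < 16: break' loop.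
def getDBLLoop (lenTemp loopCount : Int) : Int × Int :=
  let lenTemp' := lenTemp - 16
  let loopCount' := loopCount + 1
  if lenTemp' < 16 then (lenTemp', loopCount') else getDBLLoop lenTemp' loopCount'
termination_by lenTemp.toNat
decreasing_by omega

def getDataBlockLength (received_data : List Int) : Int × Int :=
  match PySem.List.pyGet? received_data 2 with
  | none => (0, 0)  -- unreachable under Pre_ (Python raises IndexError)
  | some lenVal =>
    let dlnCount : Int := 5
    let dbnCount : Int := 2
    let dlCount : Int := 5
    let minCount : Int := 5
    if lenVal > minCount then
      let lenTemp := lenVal - dlCount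
      let r := getDBLLoop lenTemp 0
      let loopCount := if r.1 > 0 then r.2 + 1 else r.2
      (loopCount, lenVal + dlnCount + loopCount * dbnCount)
    else if lenVal == minCount then
      (0, lenVal + dlnCount)
    else
      (-1, -1)

-- ===== PORT B =====
def getDataBlockLength_alt (received_data : List Int) : Int × Int :=
  match PySem.List.pyGet? received_data 2 with
  | none => (-1, -1)  -- unreachable under Pre_ (Python raises IndexError)
  | some lenVal =>
    if lenVal > 5 then
      let loopCount := PySem.Int.floordiv (lenVal + 10) 16
      (loopCount, lenVal + 5 + loopCount * 2)
    else if lenVal == 5 then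
      (0, lenVal + 5)
    else
      (-1, -1)

-- ===== PRECONDITION & SPEC =====
-- Pre_ excludes only lists shorter than 3, on which Python's received_data[2] raises IndexError.
def Pre_getDataBlockLength (received_data : List Int) : Prop := 3 ≤ received_data.length
instance (received_data : List Int) : Decidable (Pre_getDataBlockLength received_data) := by unfold Pre_getDataBlockLength; infer_instance
def pvWitness_getDataBlockLength : List Int := [5, 100, 23]

def Spec_getDataBlockLength (received_data : List Int) (out : Int × Int) : Prop := out = getDataBlockLength_alt received_data
instance (received_data : List Int) (out : Int × Int) : Decidable (Spec_getDataBlockLength received_data out) := by unfold Spec_getDataBlockLength; infer_instance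

-- ===== CLAIM (what is proved, stated in full; the proofs are below) =====
def Claim_equal_getDataBlockLength : Prop := ∀ (received_data : List Int), Dom_getDataBlockLength received_data → Pre_getDataBlockLength received_data → Spec_getDataBlockLength received_data (getDataBlockLength received_data)

-- ===== LEMMAS AND PROOFS =====

-- The loop result, combined with A's post-loop "extra block" increment, is ceiling
-- division: c + ceil(t/16) = c + (t+15)/16 for t ≥ 1.
theorem getDBLLoop_count (t c : Int) (ht : 1 ≤ t) :
    (if (getDBLLoop t c).1 > 0 then (getDBLLoop t c).2 + 1 else (getDBLLoop t c).2)
      = c + (t + 15) / 16 := by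
  by_cases h : t - 16 < 16
  · rw [getDBLLoop]
    simp only [h, if_true]
    by_cases h2 : t - 16 > 0 <;> simp only [h2, if_true, if_false] <;> omega
  · rw [getDBLLoop]
    simp only [h, if_false]
    rw [getDBLLoop_count (t - 16) (c + 1) (by omega)]
    omega
termination_by t.toNat
decreasing_by omega

-- ===== VERDICT (by name: the statement is the Claim_ definition above) =====
theorem getDataBlockLength_spec : Claim_equal_getDataBlockLength := by
  intro received_data _ _
  unfold Spec_getDataBlockLength getDataBlockLength getDataBlockLength_alt
  rename_i hpre
  cases h : PySem.List.pyGet? received_data 2 with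
  | none =>
    exfalso
    simp [PySem.List.pyGet?, PySem.List.pyIdx?] at h
    unfold Pre_getDataBlockLength at hpre
    omega
  | some lenVal =>
    simp only []
    by_cases h5 : lenVal > 5
    · simp only [h5, if_true]
      have := getDBLLoop_count (lenVal - 5) 0 (by omega)
      have hfd : PySem.Int.floordiv (lenVal + 10) 16 = (lenVal + 10) / 16 :=
        PySem.Int.floordiv_eq_ediv_of_pos (by omega)
      rw [Prod.mk.injEq, this, hfd]
      omega
    · simp [h5]
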